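-- pv_equiv track=rewrite | github.com/steventhan/code-katas | string_pyramid.py | watch_pyramid_from_the_side
-- ===== SOURCE A (Python) =====
-- def get_side_lines(characters):
--     """Get pyramid side lines."""
--     if len(characters) < 1:
--         raise ValueError('Pyramid can only be built with non-empty string.')
--     lines = []
--     num_characters = 1
--     while len(characters) >= 1:
--         lines.append(characters[-1] * num_characters)
--         num_characters += 2
--         characters = characters[:-1]
--     return lines
--
-- def watch_pyramid_from_the_side(characters):
--     """Get view from the side."""
--     if not characters:
--         return characters
--     lines = get_side_lines(characters)
--     line_width = len(lines[-1])
--     output = ''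
--     for line in lines:
--         if len(line) == line_width:
--             output += line
--         else:
--             spaces = ' ' * int((line_width - len(line)) / 2)
--             output += '{}{}{}\n'.format(spaces, line, spaces)
--     return output
-- ===== SOURCE B (Python) =====
-- def watch_pyramid_from_the_side(characters):
--     """Get view from the side."""
--     if not characters:
--         return characters
--     n = len(characters)
--     rows = []
--     for i in range(n):
--         pad = ' ' * (n - 1 - i)
--         rows.append(pad + characters[n - 1 - i] * (2 * i + 1) + pad)
--     return '\n'.join(rows)
-- ===== Notes on version B (the rewrite author's own statement) =====
-- stated objective: simpler
-- what changed: Builds each padded row directly from its index in one pass and joins the rows with newlines, removing the separate line-builder loop, the max-width computation and the width-equality branch (join makes the widest last row need no padding and no trailing newline).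
import Mathlib
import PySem

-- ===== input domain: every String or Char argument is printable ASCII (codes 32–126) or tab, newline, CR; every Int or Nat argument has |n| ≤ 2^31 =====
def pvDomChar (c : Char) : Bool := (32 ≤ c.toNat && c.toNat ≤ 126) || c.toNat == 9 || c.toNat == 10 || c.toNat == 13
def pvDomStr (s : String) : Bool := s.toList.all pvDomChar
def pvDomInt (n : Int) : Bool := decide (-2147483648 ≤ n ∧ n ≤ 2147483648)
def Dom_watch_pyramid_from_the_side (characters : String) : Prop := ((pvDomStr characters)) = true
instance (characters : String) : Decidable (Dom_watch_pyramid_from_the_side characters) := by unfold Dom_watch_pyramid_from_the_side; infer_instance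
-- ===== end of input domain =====

-- B builds each padded row directly from its index in one pass and joins with '\n' (simpler);
-- A first collects the bare lines, then pads against the maximum width with a width-equality branch.

-- ===== PORT A =====
-- while len(characters) >= 1: lines.append(characters[-1] * num); num += 2; characters = characters[:-1]
def pvGetSideLinesLoop (cs : List Char) (num : Nat) (acc : List (List Char)) :
    List (List Char) :=
  if h : cs ≠ [] then
    pvGetSideLinesLoop cs.dropLast (num + 2) (acc ++ [List.replicate num (cs.getLast h)])
  else acc
termination_by cs.length
decreasing_by
  have : 0 < cs.length := List.length_pos_iff.mpr h
  simp [List.length_dropLast]; omega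

def watch_pyramid_from_the_side (characters : String) : String :=
  if characters.toList = [] then characters
  else
    let lines := pvGetSideLinesLoop characters.toList 1 []
    let line_width := (lines.getLastD []).length
    let out := lines.foldl (fun out line =>
      if line.length = line_width then out ++ line
      else
        let spaces := List.replicate ((line_width - line.length) / 2) ' '
        out ++ spaces ++ line ++ spaces ++ ['\n']) ([] : List Char)
    String.mk out

-- ===== PORT B =====
def watch_pyramid_from_the_side_alt (characters : String) : String :=
  if characters.toList = [] then characters
  else
    let cs := characters.toList
    let n := cs.length
    let rows := (List.range n).map (fun i =>
      let pad := List.replicate (n - 1 - i) ' '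
      pad ++ List.replicate (2 * i + 1) (cs.getD (n - 1 - i) ' ') ++ pad)
    String.mk (PySem.Chars.join ['\n'] rows)

-- ===== PRECONDITION & SPEC =====
def Spec_watch_pyramid_from_the_side (characters : String) (out : String) : Prop := out = watch_pyramid_from_the_side_alt characters
instance (characters : String) (out : String) : Decidable (Spec_watch_pyramid_from_the_side characters out) := by unfold Spec_watch_pyramid_from_the_side; infer_instance

-- ===== CLAIM (what is proved, stated in full; the proofs are below) =====
def Claim_equal_watch_pyramid_from_the_side : Prop := ∀ (characters : String), Dom_watch_pyramid_from_the_side characters → Spec_watch_pyramid_from_the_side characters (watch_pyramid_from_the_side characters)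

-- ===== LEMMAS AND PROOFS =====

-- A's line-builder loop produces, at position i, the (i-th from the end) character repeated num+2i times.
theorem pvGetSideLinesLoop_eq (cs : List Char) : ∀ (num : Nat) (acc : List (List Char)),
    pvGetSideLinesLoop cs num acc =
      acc ++ (List.range cs.length).map
        (fun i => List.replicate (num + 2 * i) (cs.getD (cs.length - 1 - i) ' ')) := by
  induction cs using List.reverseRecOn with
  | nil => intro num acc; simp [pvGetSideLinesLoop]
  | append_singleton ys a ih =>
    intro num acc
    rw [pvGetSideLinesLoop, dif_pos (by simp), List.dropLast_concat, List.getLast_concat, ih]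
    simp only [List.length_append, List.length_singleton]
    rw [List.range_succ_eq_map, List.map_cons, List.map_map]
    simp only [List.append_assoc, List.singleton_append]
    congr 1
    congr 1
    · have h0 : ys.length + 1 - 1 - 0 = ys.length := by omega
      rw [h0, List.getD_eq_getElem?_getD, List.getElem?_append_right (Nat.le_refl _)]
      simp
    · apply List.map_congr_left
      intro i hi
      have hi' : i < ys.length := List.mem_range.mp hi
      simp only [Function.comp, Nat.succ_eq_add_one]
      have h1 : ys.length + 1 - 1 - (i + 1) = ys.length - 1 - i := by omega
      rw [h1]
      congr 1
      · omega
      · have h2 : ys.length - 1 - i < ys.length := by omega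
        rw [List.getD_eq_getElem?_getD, List.getD_eq_getElem?_getD,
          List.getElem?_append_left h2]

-- A's output loop with the branch pulled into the appended piece.
theorem pv_foldl_if_append (w : Nat) (lines : List (List Char)) (acc : List Char) :
    lines.foldl (fun out line =>
      if line.length = w then out ++ line
      else
        let spaces := List.replicate ((w - line.length) / 2) ' '
        out ++ spaces ++ line ++ spaces ++ ['\n']) acc =
    lines.foldl (fun out line => out ++
      (if line.length = w then line
       else
        let spaces := List.replicate ((w - line.length) / 2) ' '
        spaces ++ line ++ spaces ++ ['\n'])) acc := by
  induction lines generalizing acc with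
  | nil => rfl
  | cons l ls ih =>
    simp only [List.foldl_cons]
    split_ifs with h
    · exact ih _
    · rw [ih]; congr 1; simp [List.append_assoc]

-- join over a nonempty tail.
theorem pv_join_cons_ne (sep p : List Char) (rest : List (List Char)) (h : rest ≠ []) :
    PySem.Chars.join sep (p :: rest) = p ++ sep ++ PySem.Chars.join sep rest := by
  cases rest with
  | nil => exact absurd rfl h
  | cons q t => exact PySem.Chars.join_cons_cons sep p q t

-- '\n'.join over rows indexed by range (m+1): every row but the last gets a trailing newline.
theorem pv_join_range (r : Nat → List Char) : ∀ (m : Nat),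
    PySem.Chars.join ['\n'] ((List.range (m + 1)).map r) =
      (List.range (m + 1)).flatMap
        (fun i => if i = m then r i else r i ++ ['\n']) := by
  intro m
  induction m generalizing r with
  | zero => simp [PySem.Chars.join_singleton]
  | succ m ih =>
    rw [List.range_succ_eq_map, List.map_cons, List.map_map,
      pv_join_cons_ne _ _ _ (by simp), ih (r ∘ Nat.succ),
      List.flatMap_cons, List.flatMap_map]
    have h0 : ¬ ((0 : Nat) = m + 1) := by omega
    rw [if_neg h0]
    simp only [List.append_assoc, List.singleton_append]
    congr 2
    congr 1
    funext i
    simp only [Function.comp, Nat.succ_eq_add_one, Nat.add_left_inj]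

theorem watch_pyramid_from_the_side_spec : Claim_equal_watch_pyramid_from_the_side := by
  intro characters _
  show watch_pyramid_from_the_side characters = watch_pyramid_from_the_side_alt characters
  unfold watch_pyramid_from_the_side watch_pyramid_from_the_side_alt
  by_cases hE : characters.toList = []
  · simp [hE]
  · simp only [hE, if_false]
    congr 1
    obtain ⟨m, hm⟩ : ∃ m, characters.toList.length = m + 1 := by
      have := List.length_pos_iff.mpr hE
      exact ⟨characters.toList.length - 1, by omega⟩
    set cs := characters.toList with hcs
    rw [pvGetSideLinesLoop_eq, List.nil_append, hm]
    have hw : (((List.range (m + 1)).map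
        (fun i => List.replicate (1 + 2 * i) (cs.getD (m + 1 - 1 - i) ' '))).getLastD []).length
        = 1 + 2 * m := by
      rw [List.range_succ]; simp
    rw [hw, pv_foldl_if_append, PySem.List.foldl_append_eq_flatMap, List.nil_append,
      List.flatMap_map]
    rw [pv_join_range, List.flatMap_def, List.flatMap_def]
    congr 1
    apply List.map_congr_left
    intro i hi
    have hi' : i < m + 1 := List.mem_range.mp hi
    by_cases him : i = m
    · subst him
      have h0 : i + 1 - 1 - i = 0 := by omega
      rw [h0]
      simp only [List.replicate_zero, List.nil_append, List.append_nil]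
      rw [Nat.add_comm]
      simp
    · have hne : ¬ (List.replicate (1 + 2 * i) (cs.getD (m + 1 - 1 - i) ' ')).length = 1 + 2 * m := by
        simp only [List.length_replicate]; omega
      rw [if_neg hne, if_neg him]
      simp only [List.length_replicate]
      have hsp : (1 + 2 * m - (1 + 2 * i)) / 2 = m - i := by omega
      have hpad : m + 1 - 1 - i = m - i := by omega
      rw [hsp, hpad, Nat.add_comm 1 (2 * i)]
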